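-- pv_equiv track=rewrite | github.com/hopeswiller/DataStructuresAlgorithm.Python | FootballScores.py | counts
-- ===== SOURCE A (Python) =====
-- def counts(teamA, teamB):
--     # Write your code here
--
--     res = []
--     for b in range(len(teamB)):
--         goals, matches = 0, 0
--         for a in range(len(teamA)):
--             goals += teamA[a]
--             matches += 1
--
--             if goals <= teamB[b]:
--                 continue
--             else:
--                 break
--
--         res.append(matches)
--
--     return res
-- ===== SOURCE B (Python) =====
-- def counts(teamA, teamB):
--     # Running maximum of prefix sums is nondecreasing, so each threshold
--     # can be answered by binary search instead of rescanning teamA.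
--     maxpref = []
--     s = 0
--     m = None
--     for x in teamA:
--         s += x
--         m = s if m is None or s > m else m
--         maxpref.append(m)
--     n = len(teamA)
--     res = []
--     for b in teamB:
--         lo, hi = 0, n
--         while lo < hi:
--             mid = (lo + hi) // 2
--             if maxpref[mid] <= b:
--                 lo = mid + 1
--             else:
--                 hi = mid
--         res.append(min(lo + 1, n))
--     return res
-- ===== Notes on version B (the rewrite author's own statement) =====
-- stated objective: faster
-- what changed: B precomputes the running maximum of prefix sums of teamA once and answers each teamB threshold by binary search on that nondecreasing array, instead of rescanning teamA for every threshold.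
import Mathlib
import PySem

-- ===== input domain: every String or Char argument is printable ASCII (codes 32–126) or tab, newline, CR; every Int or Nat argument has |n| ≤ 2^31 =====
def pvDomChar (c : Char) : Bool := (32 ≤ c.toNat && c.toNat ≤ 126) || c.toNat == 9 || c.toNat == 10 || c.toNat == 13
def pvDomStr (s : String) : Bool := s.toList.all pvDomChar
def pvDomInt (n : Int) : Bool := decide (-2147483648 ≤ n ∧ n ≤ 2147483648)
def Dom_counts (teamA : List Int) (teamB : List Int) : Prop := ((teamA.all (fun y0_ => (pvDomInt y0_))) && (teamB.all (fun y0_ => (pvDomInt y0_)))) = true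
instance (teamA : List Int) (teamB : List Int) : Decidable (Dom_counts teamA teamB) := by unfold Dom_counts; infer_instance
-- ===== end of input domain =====

-- B replaces A's per-threshold rescan of teamA by one pass building the running
-- maximum of prefix sums plus a binary search per threshold (objective: faster).

-- ===== PORT A =====
-- inner `for a in range(len(teamA))` loop: accumulate goals/matches, break when goals > b
def countsInner (teamA : List Int) (b : Int) (goals matchs : Int) : Int :=
  match teamA with
  | [] => matchs
  | a :: rest =>
    let goals := goals + a
    let matchs := matchs + 1
    if goals ≤ b then countsInner rest b goals matchs else matchs

def counts (teamA : List Int) (teamB : List Int) : List Int :=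
  teamB.map (fun b => countsInner teamA b 0 0)

-- ===== PORT B =====
-- first loop of Source B: build the running maximum of prefix sums
def buildMax (l : List Int) (s : Int) (m : Option Int) : List Int :=
  match l with
  | [] => []
  | x :: rest =>
    let s := s + x
    let m := match m with
      | none => s
      | some mv => if s > mv then s else mv
    m :: buildMax rest s (some m)

-- the `while lo < hi` binary-search loop of Source B
def bsearch (mp : List Int) (b : Int) (lo hi : Nat) : Nat :=
  if _h : lo < hi then
    -- mid = (lo + hi) // 2, inlined
    if mp.getD ((lo + hi) / 2) 0 ≤ b then bsearch mp b ((lo + hi) / 2 + 1) hi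
    else bsearch mp b lo ((lo + hi) / 2)
  else lo
termination_by hi - lo
decreasing_by all_goals omega

def counts_alt (teamA : List Int) (teamB : List Int) : List Int :=
  let mp := buildMax teamA 0 none
  let n := teamA.length
  teamB.map (fun b => min ((bsearch mp b 0 n : Int) + 1) (n : Int))

-- ===== PRECONDITION & SPEC =====
def Spec_counts (teamA : List Int) (teamB : List Int) (out : List Int) : Prop := out = counts_alt teamA teamB
instance (teamA : List Int) (teamB : List Int) (out : List Int) : Decidable (Spec_counts teamA teamB out) := by unfold Spec_counts; infer_instance

-- ===== CLAIM (what is proved, stated in full; the proofs are below) =====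
def Claim_equal_counts : Prop := ∀ (teamA : List Int) (teamB : List Int), Dom_counts teamA teamB → Spec_counts teamA teamB (counts teamA teamB)

-- ===== LEMMAS AND PROOFS =====

theorem countsInner_shift (l : List Int) (b g m : Int) :
    countsInner l b g m = m + countsInner l (b - g) 0 0 := by
  induction l generalizing b g m with
  | nil => simp [countsInner]
  | cons a rest ih =>
    simp only [countsInner]
    by_cases h : g + a ≤ b
    · rw [if_pos h, if_pos (by omega : (0:Int) + a ≤ b - g)]
      rw [ih b (g + a) (m + 1), ih (b - g) (0 + a) (0 + 1)]
      have h2 : b - g - (0 + a) = b - (g + a) := by ring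
      rw [h2]; ring
    · rw [if_neg h, if_neg (by omega : ¬ ((0:Int) + a ≤ b - g))]
      ring

theorem buildMax_length (l : List Int) (s : Int) (m : Option Int) :
    (buildMax l s m).length = l.length := by
  induction l generalizing s m with
  | nil => rfl
  | cons x rest ih => simp [buildMax, ih]

theorem buildMax_some (l : List Int) (s mv : Int) :
    buildMax l s (some mv) = (buildMax l s none).map (fun v => max mv v) := by
  induction l generalizing s mv with
  | nil => rfl
  | cons x rest ih =>
    simp only [buildMax, List.map_cons]
    congr 1
    · omega
    · rw [ih (s + x) (if s + x > mv then s + x else mv), ih (s + x) (s + x)]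
      simp only [List.map_map, Function.comp_def]
      apply List.map_congr_left
      intro v _
      omega

theorem buildMax_shift (l : List Int) (s : Int) :
    buildMax l s none = (buildMax l 0 none).map (fun v => v + s) := by
  induction l generalizing s with
  | nil => rfl
  | cons x rest ih =>
    simp only [buildMax, List.map_cons]
    congr 1
    · omega
    · rw [buildMax_some rest (s + x) (s + x), buildMax_some rest (0 + x) (0 + x),
        ih (s + x), ih (0 + x)]
      simp only [List.map_map, Function.comp_def]
      apply List.map_congr_left
      intro v _
      omega

theorem buildMax_cons (a : Int) (rest : List Int) :
    buildMax (a :: rest) 0 none =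
      a :: (buildMax rest 0 none).map (fun v => max a (v + a)) := by
  simp only [buildMax, zero_add]
  congr 1
  · rw [buildMax_some rest a a, buildMax_shift rest a]
    simp only [List.map_map, Function.comp_def]

theorem buildMax_sorted_seed (l : List Int) (s mv : Int) :
    List.Pairwise (· ≤ ·) (buildMax l s (some mv)) ∧
      (∀ y ∈ buildMax l s (some mv), mv ≤ y) := by
  induction l generalizing s mv with
  | nil => simp [buildMax]
  | cons x rest ih =>
    simp only [buildMax, List.pairwise_cons, List.mem_cons]
    have hm : mv ≤ (if s + x > mv then s + x else mv) := by omega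
    obtain ⟨hp, hall⟩ := ih (s + x) (if s + x > mv then s + x else mv)
    refine ⟨⟨fun y hy => hall y hy, hp⟩, ?_⟩
    rintro y (rfl | hy)
    · exact hm
    · exact le_trans hm (hall y hy)

theorem buildMax_sorted (l : List Int) :
    List.Pairwise (· ≤ ·) (buildMax l 0 none) := by
  cases l with
  | nil => simp [buildMax]
  | cons x rest =>
    simp only [buildMax, List.pairwise_cons]
    obtain ⟨hp, hall⟩ := buildMax_sorted_seed rest (0 + x) (0 + x)
    exact ⟨hall, hp⟩

theorem countsInner_findIdx (l : List Int) (b : Int) :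
    countsInner l b 0 0 =
      ((min (List.findIdx (fun v => decide (b < v)) (buildMax l 0 none) + 1) l.length : Nat) : Int) := by
  induction l generalizing b with
  | nil => simp [countsInner, buildMax]
  | cons a rest ih =>
    rw [buildMax_cons]
    simp only [countsInner, List.findIdx_cons, List.length_cons, zero_add]
    by_cases h : a ≤ b
    · have hnb : (decide (b < a)) = false := by simp; omega
      rw [hnb]
      simp only [cond_false]
      rw [if_pos h, countsInner_shift rest b a 1, ih (b - a)]
      rw [List.findIdx_map]
      have hpred : ((fun v => decide (b < v)) ∘ (fun v => max a (v + a)))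
          = (fun v => decide (b - a < v)) := by
        funext v
        have he : (b < max a (v + a)) = (b - a < v) := by
          apply propext
          constructor <;> intro <;> omega
        simp only [Function.comp_def, he]
      rw [hpred]
      push_cast [Nat.cast_min]
      omega
    · have hb : (decide (b < a)) = true := by simp; omega
      rw [hb]
      simp only [cond_true]
      rw [if_neg h]
      push_cast [Nat.cast_min]
      have := List.findIdx_le_length (p := fun v => decide (b - a < v)) (xs := buildMax rest 0 none)
      omega

theorem bsearch_fuel (mp : List Int) (b : Int) (fuel : Nat) :
    ∀ lo hi : Nat, hi - lo ≤ fuel →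
      List.Pairwise (· ≤ ·) mp →
      lo ≤ List.findIdx (fun v => decide (b < v)) mp →
      List.findIdx (fun v => decide (b < v)) mp ≤ hi →
      hi ≤ mp.length →
      bsearch mp b lo hi = List.findIdx (fun v => decide (b < v)) mp := by
  induction fuel with
  | zero =>
    intro lo hi hf _ h1 h2 _
    rw [bsearch, dif_neg (by omega : ¬ lo < hi)]
    omega
  | succ fuel ih =>
    intro lo hi hf hs h1 h2 h3
    rw [bsearch]
    by_cases hlt : lo < hi
    · rw [dif_pos hlt]
      set k := List.findIdx (fun v => decide (b < v)) mp with hk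
      set mid := (lo + hi) / 2 with hmid
      have hmlo : lo ≤ mid := by omega
      have hmhi : mid < hi := by omega
      have hmlen : mid < mp.length := by omega
      rw [List.getD_eq_getElem mp 0 hmlen]
      by_cases hc : mp[mid] ≤ b
      · rw [if_pos hc]
        have hkm : mid + 1 ≤ k := by
          by_contra hcon
          have hkmid : k ≤ mid := by omega
          have hklen : k < mp.length := by omega
          have hbk : decide (b < mp[k]) = true := List.findIdx_getElem (w := by rw [← hk]; exact hklen)
          have hbk' : b < mp[k] := by simpa using hbk
          rcases Nat.lt_or_ge k mid with hlt' | hge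
          · have := (List.pairwise_iff_getElem.mp hs) k mid hklen hmlen hlt'
            omega
          · have hme : mp[k] = mp[mid] := by congr 1; omega
            omega
        exact ih (mid + 1) hi (by omega) hs hkm h2 h3
      · rw [if_neg hc]
        have hkm : k ≤ mid := by
          by_contra hcon
          have := List.not_of_lt_findIdx (p := fun v => decide (b < v)) (xs := mp) (i := mid)
            (by rw [← hk]; omega)
          simp at this
          omega
        exact ih lo mid (by omega) hs h1 hkm (by omega)
    · rw [dif_neg hlt]
      omega

-- ===== VERDICT (by name: the statement is the Claim_ definition above) =====
theorem counts_spec : Claim_equal_counts := by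
  intro teamA teamB _
  unfold Spec_counts counts counts_alt
  apply List.map_congr_left
  intro b _
  have hlen : (buildMax teamA 0 none).length = teamA.length := buildMax_length _ _ _
  have hk := List.findIdx_le_length (p := fun v => decide (b < v)) (xs := buildMax teamA 0 none)
  rw [countsInner_findIdx teamA b,
    bsearch_fuel (buildMax teamA 0 none) b teamA.length 0 teamA.length (by omega)
      (buildMax_sorted teamA) (by omega) (by omega) (by omega)]
  push_cast [Nat.cast_min]
  omega
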